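-- pv_equiv track=rewrite | github.com/WitalyK/Python_Stepik | periodic.py | lastseq
-- ===== SOURCE A (Python) =====
-- def lastseq(num, m):
--     m = num + m
--     l = [0] * (num // 2)
--     while m > 0:
--         for i in range(num // 2):
--             l[i] += 1
--             m -= 1
--             if m == 0:
--                 return ''.join([str(item) for item in l])
-- ===== SOURCE B (Python) =====
-- def lastseq(num, m):
--     total = num + m
--     if total <= 0:
--         return None
--     k = num // 2
--     q, r = divmod(total, k)
--     return ''.join([str(q + 1)] * r + [str(q)] * (k - r))
-- ===== Notes on version B (the rewrite author's own statement) =====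
-- stated objective: faster
-- what changed: Replaces the round-robin while/for loop that performs num+m single increments with a closed form: q, r = divmod(num+m, num//2), first r slots get q+1 and the rest get q.
import Mathlib
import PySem

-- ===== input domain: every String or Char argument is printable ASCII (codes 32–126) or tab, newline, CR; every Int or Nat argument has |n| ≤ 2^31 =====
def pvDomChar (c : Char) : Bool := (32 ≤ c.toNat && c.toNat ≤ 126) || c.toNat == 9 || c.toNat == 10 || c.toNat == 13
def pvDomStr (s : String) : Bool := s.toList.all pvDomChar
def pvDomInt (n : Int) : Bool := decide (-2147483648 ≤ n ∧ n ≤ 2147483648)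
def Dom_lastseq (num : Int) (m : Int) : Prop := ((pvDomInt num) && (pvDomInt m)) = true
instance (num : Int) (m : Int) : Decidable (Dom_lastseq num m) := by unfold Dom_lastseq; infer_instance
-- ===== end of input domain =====

-- B replaces A's one-increment-at-a-time round-robin loop (O(num+m) steps) with the
-- closed form q, r = divmod(num+m, num//2): objective 'faster' (asymptotic).

-- ===== PORT A =====
-- inner 'for i in range(num // 2)': l[i] += 1; m -= 1; if m == 0: return ''.join(...)
-- indices produced by range are always in bounds, so l.getD/l.set is exact here
def lastseqForA : List Nat → List Int → Int → String ⊕ (List Int × Int)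
  | [], l, m => Sum.inr (l, m)
  | i :: is, l, m =>
      let l' := l.set i (l.getD i 0 + 1)
      let m' := m - 1
      if m' = 0 then Sum.inl (PySem.Str.join "" (l'.map PySem.Int.toStr))
      else lastseqForA is l' m'

-- outer 'while m > 0'; fuel only makes the loop total (A diverges when num+m > 0 and
-- num//2 ≤ 0; those inputs are excluded by Pre_lastseq and the fuel is never exhausted
-- on admitted inputs, as the proof shows)
def lastseqWhileA : Nat → Nat → List Int → Int → Option String
  | 0, _, _, _ => none
  | fuel + 1, k, l, m =>
      if 0 < m then
        match lastseqForA (List.range k) l m with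
        | Sum.inl s => some s
        | Sum.inr (l', m') => lastseqWhileA fuel k l' m'
      else none

def lastseq (num : Int) (m : Int) : Option String :=
  let m1 := num + m
  let k := PySem.Int.floordiv num 2
  lastseqWhileA (m1.toNat + 1) k.toNat (List.replicate k.toNat 0) m1

-- ===== PORT B =====
def lastseq_alt (num : Int) (m : Int) : Option String :=
  let total := num + m
  if total ≤ 0 then none
  else
    let k := PySem.Int.floordiv num 2
    let q := PySem.Int.floordiv total k
    let r := PySem.Int.mod total k
    some (PySem.Str.join ""
      (List.replicate r.toNat (PySem.Int.toStr (q + 1)) ++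
       List.replicate (k - r).toNat (PySem.Int.toStr q)))

-- ===== PRECONDITION & SPEC =====
-- Pre_ excludes exactly the inputs where A never returns: if num+m > 0 but num//2 ≤ 0
-- the inner 'for' is empty and the 'while m > 0' loop spins forever.
def Pre_lastseq (num : Int) (m : Int) : Prop :=
  0 < num + m → 0 < PySem.Int.floordiv num 2

instance (num : Int) (m : Int) : Decidable (Pre_lastseq num m) := by
  unfold Pre_lastseq; infer_instance

def pvWitness_lastseq : Int × Int := (4, 3)

def Spec_lastseq (num : Int) (m : Int) (out : Option String) : Prop := out = lastseq_alt num m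
instance (num : Int) (m : Int) (out : Option String) : Decidable (Spec_lastseq num m out) := by unfold Spec_lastseq; infer_instance

-- ===== CLAIM (what is proved, stated in full; the proofs are below) =====
def Claim_equal_lastseq : Prop := ∀ (num : Int) (m : Int), Dom_lastseq num m → Pre_lastseq num m → Spec_lastseq num m (lastseq num m)

-- ===== LEMMAS AND PROOFS =====

-- list shape lemmas for one increment step
theorem lastseq_getD_rep (j n : Nat) (x y : Int) :
    (List.replicate j x ++ List.replicate (n + 1) y).getD j 0 = y := by
  have hj : j < (List.replicate j x ++ List.replicate (n + 1) y).length := by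
    simp
  rw [List.getD_eq_getElem _ _ hj, List.getElem_append_right (by simp)]
  simp

theorem lastseq_set_rep (j n : Nat) (x y : Int) :
    (List.replicate j x ++ List.replicate (n + 1) y).set j x
      = List.replicate (j + 1) x ++ List.replicate n y := by
  induction j with
  | zero => simp [List.replicate_succ]
  | succ j ih =>
      have h2 : List.replicate (j + 1) x ++ List.replicate (n + 1) y
          = x :: (List.replicate j x ++ List.replicate (n + 1) y) := rfl
      rw [h2]
      show x :: ((List.replicate j x ++ List.replicate (n + 1) y).set j x) = _
      rw [ih]
      rfl

-- the inner for-loop, started at slot j with the first j slots already bumped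
theorem lastseqForA_spec (n : Nat) : ∀ (j : Nat) (c m : Int), 0 < m →
    lastseqForA (List.range' j n) (List.replicate j (c + 1) ++ List.replicate n c) m =
      if m.toNat ≤ n then
        Sum.inl (PySem.Str.join ""
          ((List.replicate (j + m.toNat) (c + 1) ++ List.replicate (n - m.toNat) c).map PySem.Int.toStr))
      else Sum.inr (List.replicate (j + n) (c + 1), m - (n : Int)) := by
  induction n with
  | zero =>
      intro j c m hm
      have : ¬ m.toNat ≤ 0 := by omega
      simp [lastseqForA, this]
  | succ n ih =>
      intro j c m hm
      rw [List.range'_succ]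
      simp only [lastseqForA]
      rw [lastseq_getD_rep, lastseq_set_rep]
      by_cases h1 : m - 1 = 0
      · have hm1 : m.toNat = 1 := by omega
        simp only [if_pos h1, hm1]
        rw [if_pos (by omega : 1 ≤ n + 1)]
        norm_num
      · have hm2 : 0 < m - 1 := by omega
        rw [if_neg h1]
        rw [ih (j + 1) c (m - 1) hm2]
        by_cases h2 : (m - 1).toNat ≤ n
        · rw [if_pos h2, if_pos (by omega : m.toNat ≤ n + 1)]
          rw [show j + 1 + (m - 1).toNat = j + m.toNat from by omega,
            show n - (m - 1).toNat = n + 1 - m.toNat from by omega]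
        · rw [if_neg h2, if_neg (by omega : ¬ m.toNat ≤ n + 1)]
          rw [show j + 1 + n = j + (n + 1) from by omega,
            show m - 1 - (n : Int) = m - ((n : Int) + 1) from by ring]
          push_cast
          rfl

-- the while-loop: round-robin from uniform level c with m > 0 left to hand out
theorem lastseqWhileA_spec (fuel : Nat) : ∀ (k : Nat) (c m : Int),
    0 < k → 0 < m → m.toNat ≤ fuel →
    lastseqWhileA fuel k (List.replicate k c) m =
      some (PySem.Str.join ""
        ((List.replicate (m - ((m - 1) / (k : Int)) * k).toNat (c + (m - 1) / (k : Int) + 1) ++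
          List.replicate (k - (m - ((m - 1) / (k : Int)) * k).toNat) (c + (m - 1) / (k : Int))).map
          PySem.Int.toStr)) := by
  induction fuel with
  | zero => intro k c m hk hm hf; omega
  | succ fuel ih =>
      intro k c m hk hm hf
      have hrange : List.range k = List.range' 0 k := by
        simp [List.range_eq_range']
      simp only [lastseqWhileA, if_pos hm]
      have hstart : List.replicate k c
          = List.replicate 0 (c + 1) ++ List.replicate k c := by simp
      rw [hstart, hrange, lastseqForA_spec k 0 c m hm]
      by_cases h2 : m.toNat ≤ k
      · rw [if_pos h2]
        have hq : (m - 1) / (k : Int) = 0 :=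
          Int.ediv_eq_zero_of_lt (by omega) (by omega)
        show some (PySem.Str.join ""
            ((List.replicate (0 + m.toNat) (c + 1) ++ List.replicate (k - m.toNat) c).map
              PySem.Int.toStr)) = _
        rw [hq]
        norm_num
      · rw [if_neg h2]
        have hm' : 0 < m - (k : Int) := by omega
        have hf' : (m - (k : Int)).toNat ≤ fuel := by omega
        show lastseqWhileA fuel k (List.replicate (0 + k) (c + 1)) (m - (k : Int)) = _
        rw [zero_add, ih k (c + 1) (m - (k : Int)) hk hm' hf']
        have hkne : (k : Int) ≠ 0 := by omega
        have hQ : (m - 1) / (k : Int) = (m - (k : Int) - 1) / (k : Int) + 1 := by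
          have h3 : m - 1 = (m - (k : Int) - 1) + 1 * (k : Int) := by ring
          rw [h3, Int.add_mul_ediv_right _ _ hkne]
        have e1 : m - ((m - (k : Int) - 1) / (k : Int) + 1) * (k : Int)
            = m - (k : Int) - (m - (k : Int) - 1) / (k : Int) * (k : Int) := by ring
        have e2 : c + ((m - (k : Int) - 1) / (k : Int) + 1)
            = c + 1 + (m - (k : Int) - 1) / (k : Int) := by ring
        rw [hQ, e1, e2]

-- the two closed forms agree: A's 'last partial pass' form vs B's divmod form
theorem lastseq_closed_eq (kk t : Int) (hk : 0 < kk) (ht : 0 < t) :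
    (List.replicate (t - ((t - 1) / kk) * kk).toNat ((0 : Int) + (t - 1) / kk + 1) ++
     List.replicate (kk.toNat - (t - ((t - 1) / kk) * kk).toNat) ((0 : Int) + (t - 1) / kk))
    = (List.replicate (t % kk).toNat (t / kk + 1) ++
       List.replicate (kk - t % kk).toNat (t / kk)) := by
  have hdm : kk * (t / kk) + t % kk = t := Int.mul_ediv_add_emod t kk
  have hr0 : 0 ≤ t % kk := Int.emod_nonneg t (by omega)
  have hrk : t % kk < kk := Int.emod_lt_of_pos t hk
  have hkne : kk ≠ 0 := by omega
  by_cases hr : t % kk = 0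
  · -- full last pass: (t-1)/kk = t/kk - 1 and the partial block has length kk
    have hq1 : 0 < t / kk := by nlinarith [hdm]
    have hQ : (t - 1) / kk = t / kk - 1 := by
      have h1 : t - 1 = (kk - 1) + (t / kk - 1) * kk := by nlinarith [hdm]
      rw [h1, Int.add_mul_ediv_right _ _ hkne,
        Int.ediv_eq_zero_of_lt (by omega) (by omega)]
      ring
    have hR : t - ((t - 1) / kk) * kk = kk := by
      rw [hQ]; nlinarith [hdm]
    rw [hR, hQ, hr]
    simp only [Int.toNat_zero, List.replicate_zero, List.nil_append,
      Nat.sub_self, List.append_nil, zero_add, Int.sub_zero]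
    congr 1
    ring
  · -- partial last pass: (t-1)/kk = t/kk and the partial block has length t % kk
    have hQ : (t - 1) / kk = t / kk := by
      have h1 : t - 1 = (t % kk - 1) + (t / kk) * kk := by linarith [hdm]
      rw [h1, Int.add_mul_ediv_right _ _ hkne,
        Int.ediv_eq_zero_of_lt (by omega) (by omega)]
      ring
    have hR : t - ((t - 1) / kk) * kk = t % kk := by
      rw [hQ]; linarith [hdm]
    rw [hR, hQ]
    simp only [zero_add,
      show kk.toNat - (t % kk).toNat = (kk - t % kk).toNat from by omega]

-- ===== VERDICT (by name: the statement is the Claim_ definition above) =====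
theorem lastseq_spec : Claim_equal_lastseq := by
  intro num m _hdom hpre
  unfold Spec_lastseq lastseq lastseq_alt
  by_cases ht : num + m ≤ 0
  · simp only [lastseqWhileA, if_neg (by omega : ¬ (0 : Int) < num + m), if_pos ht]
  · have ht : 0 < num + m := by omega
    have hk : 0 < PySem.Int.floordiv num 2 := hpre ht
    set kI := PySem.Int.floordiv num 2 with hkI
    have hkcast : (kI.toNat : Int) = kI := Int.toNat_of_nonneg (by omega)
    have hknat : 0 < kI.toNat := by omega
    rw [lastseqWhileA_spec (num + m).toNat.succ kI.toNat 0 (num + m) hknat ht (by omega)]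
    rw [if_neg (by omega : ¬ num + m ≤ 0)]
    show _ = some (PySem.Str.join ""
      (List.replicate (PySem.Int.mod (num + m) kI).toNat
          (PySem.Int.toStr (PySem.Int.floordiv (num + m) kI + 1)) ++
        List.replicate (kI - PySem.Int.mod (num + m) kI).toNat
          (PySem.Int.toStr (PySem.Int.floordiv (num + m) kI))))
    rw [PySem.Int.floordiv_eq_ediv_of_pos hk, PySem.Int.mod_eq_emod_of_pos hk]
    have hlist := congrArg (List.map PySem.Int.toStr) (lastseq_closed_eq kI (num + m) hk ht)
    simp only [List.map_append, List.map_replicate] at hlist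
    simp only [List.map_append, List.map_replicate]
    rw [hkcast, hlist]
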